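-- pv_equiv track=rewrite | github.com/ChristopherNugent/pyqueens | nqueens.py | check_partial
-- ===== SOURCE A (Python) =====
-- def check_partial(psol):
--     """Check the validity of a partial or complete solution"""
--     for y in range(len(psol)):
--         x = psol[y]
--         for y2 in range(y + 1, len(psol)):
--             x2 = psol[y2]
--             xdif = x2 - x
--             ydif = y2 - y
--             if xdif == 0 or xdif == ydif or xdif == -ydif:
--                 return False
--     return True
-- ===== SOURCE B (Python) =====
-- def check_partial(psol):
--     """Check the validity of a partial or complete solution"""
--     cols = list(psol)
--     diags = [x - i for i, x in enumerate(psol)]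
--     adiags = [x + i for i, x in enumerate(psol)]
--     return all(len(set(seq)) == len(seq) for seq in (cols, diags, adiags))
-- ===== Notes on version B (the rewrite author's own statement) =====
-- stated objective: simpler
-- what changed: Replaced the nested pairwise index scan with three independent duplicate-freeness checks on the columns, the diagonals psol[i]-i and the anti-diagonals psol[i]+i.
import Mathlib
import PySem

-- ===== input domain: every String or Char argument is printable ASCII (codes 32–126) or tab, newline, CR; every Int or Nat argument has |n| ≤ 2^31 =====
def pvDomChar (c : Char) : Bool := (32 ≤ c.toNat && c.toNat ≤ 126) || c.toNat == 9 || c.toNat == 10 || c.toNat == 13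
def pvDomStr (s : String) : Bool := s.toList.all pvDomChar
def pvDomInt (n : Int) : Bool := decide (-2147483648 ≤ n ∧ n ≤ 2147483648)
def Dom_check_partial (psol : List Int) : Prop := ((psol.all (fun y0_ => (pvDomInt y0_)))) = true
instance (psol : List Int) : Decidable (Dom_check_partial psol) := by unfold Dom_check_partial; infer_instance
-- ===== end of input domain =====

-- B replaces A's nested pairwise scan by three independent duplicate-freeness checks
-- (columns, diagonals psol[i]-i, anti-diagonals psol[i]+i); objective: simpler.

-- ===== PORT A =====
-- inner loop: for y2 in range(y+1, len(psol)): …; returns true iff a conflict with (y, x) is found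
def pvAInner (psol : List Int) (x : Int) (y : Nat) (y2 : Nat) : Bool :=
  if h : y2 < psol.length then
    let x2 := psol[y2]
    let xdif := x2 - x
    let ydif : Int := (y2 : Int) - (y : Int)
    if xdif == 0 || xdif == ydif || xdif == -ydif then true
    else pvAInner psol x y (y2 + 1)
  else false
termination_by psol.length - y2

-- outer loop: for y in range(len(psol)): …
def pvAOuter (psol : List Int) (y : Nat) : Bool :=
  if h : y < psol.length then
    let x := psol[y]
    if pvAInner psol x y (y + 1) then false else pvAOuter psol (y + 1)
  else true
termination_by psol.length - y

def check_partial (psol : List Int) : Bool := pvAOuter psol 0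

-- ===== PORT B =====
-- len(set(xs)) == len(xs)
def pvNoDup (xs : List Int) : Bool := (PySem.Set.ofList xs).length == xs.length

def check_partial_alt (psol : List Int) : Bool :=
  let cols := psol
  let diags := (PySem.List.enumerate psol).map (fun p => p.2 - p.1)
  let adiags := (PySem.List.enumerate psol).map (fun p => p.2 + p.1)
  pvNoDup cols && pvNoDup diags && pvNoDup adiags

-- ===== PRECONDITION & SPEC =====
def Spec_check_partial (psol : List Int) (out : Bool) : Prop := out = check_partial_alt psol
instance (psol : List Int) (out : Bool) : Decidable (Spec_check_partial psol out) := by unfold Spec_check_partial; infer_instance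

-- ===== CLAIM (what is proved, stated in full; the proofs are below) =====
def Claim_equal_check_partial : Prop := ∀ (psol : List Int), Dom_check_partial psol → Spec_check_partial psol (check_partial psol)

-- ===== LEMMAS AND PROOFS =====

-- the pairwise conflict predicate of A, on indices i < j
def pvConf (psol : List Int) (i j : Nat) (hi : i < psol.length) (hj : j < psol.length) : Prop :=
  psol[j] - psol[i] = 0 ∨ psol[j] - psol[i] = (j : Int) - (i : Int) ∨
    psol[j] - psol[i] = -((j : Int) - (i : Int))

theorem pvAInner_iff (psol : List Int) (y y2 : Nat) (hy : y < psol.length) :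
    pvAInner psol psol[y] y y2 = true ↔
      ∃ (j : Nat) (hj : j < psol.length), y2 ≤ j ∧ pvConf psol y j hy hj := by
  by_cases h : y2 < psol.length
  · rw [pvAInner]
    simp only [h, dif_pos]
    by_cases hc : (psol[y2] - psol[y] == 0 || psol[y2] - psol[y] == (y2 : Int) - (y : Int) ||
        psol[y2] - psol[y] == -((y2 : Int) - (y : Int))) = true
    · simp only [hc, if_pos]
      constructor
      · intro _
        refine ⟨y2, h, le_refl _, ?_⟩
        unfold pvConf
        simp only [Bool.or_eq_true, beq_iff_eq] at hc
        tauto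
      · simp
    · rw [if_neg hc, pvAInner_iff psol y (y2 + 1) hy]
      constructor
      · rintro ⟨j, hj, hle, hcf⟩
        exact ⟨j, hj, le_trans (Nat.le_succ _) hle, hcf⟩
      · rintro ⟨j, hj, hle, hcf⟩
        refine ⟨j, hj, ?_, hcf⟩
        rcases Nat.lt_or_ge y2 j with hlt | hge
        · exact hlt
        · -- j = y2, contradicting hc
          have : j = y2 := Nat.le_antisymm hge hle
          subst this
          exfalso
          apply hc
          unfold pvConf at hcf
          simp only [Bool.or_eq_true, beq_iff_eq]
          tauto
  · rw [pvAInner]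
    simp only [h, dif_neg, not_false_iff, Bool.false_eq_true, false_iff]
    rintro ⟨j, hj, hle, _⟩
    exact h (lt_of_le_of_lt hle hj)
termination_by psol.length - y2

theorem pvAOuter_iff (psol : List Int) (y : Nat) :
    pvAOuter psol y = true ↔
      ∀ (i j : Nat) (hi : i < psol.length) (hj : j < psol.length),
        y ≤ i → i < j → ¬ pvConf psol i j hi hj := by
  by_cases h : y < psol.length
  · rw [pvAOuter]
    simp only [h, dif_pos]
    by_cases hin : pvAInner psol psol[y] y (y + 1) = true
    · simp only [hin, if_pos, Bool.false_eq_true, false_iff]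
      intro hall
      rcases (pvAInner_iff psol y (y + 1) h).mp hin with ⟨j, hj, hle, hcf⟩
      exact hall y j h hj (le_refl _) hle hcf
    · rw [if_neg hin, pvAOuter_iff psol (y + 1)]
      constructor
      · intro hall i j hi hj hyi hij hcf
        rcases Nat.lt_or_ge y i with hlt | hge
        · exact hall i j hi hj hlt hij hcf
        · have : i = y := Nat.le_antisymm hge hyi
          subst this
          exact hin ((pvAInner_iff psol i (i + 1) hi).mpr ⟨j, hj, hij, hcf⟩)
      · intro hall i j hi hj hyi hij hcf
        exact hall i j hi hj (by omega) hij hcf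
  · rw [pvAOuter]
    simp only [h, dif_neg, not_false_iff, true_iff]
    intro i j hi hj hyi hij
    exact absurd hj (by omega)
termination_by psol.length - y

-- ofList is a sublist of its argument
theorem pvOfList_sublist (xs : List Int) : (PySem.Set.ofList xs).Sublist xs := by
  induction xs with
  | nil => simp [PySem.Set.ofList]
  | cons x xs ih =>
    rw [PySem.Set.ofList_cons]
    exact List.Sublist.cons₂ x (List.Sublist.trans List.filter_sublist ih)

theorem pvNoDup_iff (xs : List Int) : pvNoDup xs = true ↔ xs.Nodup := by
  unfold pvNoDup
  rw [beq_iff_eq]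
  constructor
  · intro hlen
    have := (pvOfList_sublist xs).eq_of_length hlen
    rw [← this]
    exact PySem.Set.nodup_ofList xs
  · intro hnd
    rw [PySem.Set.ofList_eq_self_of_nodup xs hnd]

theorem pvNoDup_map_iff (psol : List Int) (f : Int → Int → Int) :
    pvNoDup ((PySem.List.enumerate psol).map (fun p => f p.2 p.1)) = true ↔
      ∀ (i j : Nat) (hi : i < psol.length) (hj : j < psol.length),
        i < j → f psol[i] (i : Int) ≠ f psol[j] (j : Int) := by
  rw [pvNoDup_iff, List.Nodup, List.pairwise_iff_getElem]
  have hlen : ((PySem.List.enumerate psol).map (fun p => f p.2 p.1)).length = psol.length := by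
    simp [PySem.List.length_enumerate]
  constructor
  · intro hp i j hi hj hij
    have := hp i j (by omega) (by omega) hij
    simpa [PySem.List.getElem_enumerate] using this
  · intro hp i j hi hj hij
    have hi' : i < psol.length := by omega
    have hj' : j < psol.length := by omega
    simpa [PySem.List.getElem_enumerate] using hp i j hi' hj' hij

theorem pvNoDup_cols_iff (psol : List Int) :
    pvNoDup psol = true ↔
      ∀ (i j : Nat) (hi : i < psol.length) (hj : j < psol.length),
        i < j → psol[i] ≠ psol[j] := by
  rw [pvNoDup_iff, List.Nodup, List.pairwise_iff_getElem]

-- ===== VERDICT (by name: the statement is the Claim_ definition above) =====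
theorem check_partial_spec : Claim_equal_check_partial := by
  intro psol _
  unfold Spec_check_partial
  unfold check_partial check_partial_alt
  rw [Bool.eq_iff_iff, Bool.and_eq_true, Bool.and_eq_true,
    pvAOuter_iff, pvNoDup_cols_iff,
    pvNoDup_map_iff psol (fun x i => x - i), pvNoDup_map_iff psol (fun x i => x + i)]
  constructor
  · intro h
    refine ⟨⟨?_, ?_⟩, ?_⟩
    · intro i j hi hj hij he
      exact h i j hi hj (Nat.zero_le _) hij (Or.inl (by omega))
    · intro i j hi hj hij he
      exact h i j hi hj (Nat.zero_le _) hij (Or.inr (Or.inl (by omega)))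
    · intro i j hi hj hij he
      exact h i j hi hj (Nat.zero_le _) hij (Or.inr (Or.inr (by omega)))
  · rintro ⟨⟨hc, hd⟩, ha⟩ i j hi hj _ hij hcf
    rcases hcf with h0 | h1 | h2
    · exact hc i j hi hj hij (by omega)
    · exact hd i j hi hj hij (by omega)
    · exact ha i j hi hj hij (by omega)
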